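-- pv_equiv track=rewrite | github.com/esohel30/bluetiramisu | 03_py/warmup2/warmup2.py | array123
-- ===== SOURCE A (Python) =====
-- def array123(nums):
--
--
--   for e in range(len(nums)):
--     if(nums[e] == 1):
--         for e in range(len(nums)):
--            if(nums[e] == 2):
--                for e in range(len(nums)):
--                  if(nums[e] == 3):
--                     return True
--
--
--
--   return False
-- ===== SOURCE B (Python) =====
-- def array123(nums):
--     seen1 = seen2 = seen3 = False
--     for x in nums:
--         if x == 1:
--             seen1 = True
--         elif x == 2:
--             seen2 = True
--         elif x == 3:
--             seen3 = True
--     return seen1 and seen2 and seen3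
-- ===== Notes on version B (the rewrite author's own statement) =====
-- stated objective: simpler
-- what changed: Replaced A's three nested index-based full scans with a single pass over the list maintaining three seen1/seen2/seen3 flags.
import Mathlib
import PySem

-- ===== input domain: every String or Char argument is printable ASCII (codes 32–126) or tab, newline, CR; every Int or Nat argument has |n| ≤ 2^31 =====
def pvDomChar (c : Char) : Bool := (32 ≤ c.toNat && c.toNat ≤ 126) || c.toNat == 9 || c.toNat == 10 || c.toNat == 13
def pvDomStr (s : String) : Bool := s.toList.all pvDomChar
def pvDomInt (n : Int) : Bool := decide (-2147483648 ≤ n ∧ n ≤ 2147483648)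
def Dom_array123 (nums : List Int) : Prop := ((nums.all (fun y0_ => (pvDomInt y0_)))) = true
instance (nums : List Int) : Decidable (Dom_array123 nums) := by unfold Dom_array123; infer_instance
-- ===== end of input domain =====

-- B replaces A's three nested index-based scans by one pass maintaining three seen-flags (simpler).

-- ===== PORT A =====
-- innermost loop: for e in range(len(nums)): if nums[e] == 3: return True
def aLoop3 (nums : List Int) : List Int → Bool
  | [] => false
  | e :: rest => if PySem.List.pyGet? nums e = some 3 then true else aLoop3 nums rest

-- middle loop: for e in …: if nums[e] == 2: <inner loop may return True>
def aLoop2 (nums : List Int) : List Int → Bool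
  | [] => false
  | e :: rest =>
    if PySem.List.pyGet? nums e = some 2 then
      if aLoop3 nums (PySem.List.pyRange 0 (nums.length : Int) 1) then true
      else aLoop2 nums rest
    else aLoop2 nums rest

-- outer loop: for e in …: if nums[e] == 1: <middle loop may return True>
def aLoop1 (nums : List Int) : List Int → Bool
  | [] => false
  | e :: rest =>
    if PySem.List.pyGet? nums e = some 1 then
      if aLoop2 nums (PySem.List.pyRange 0 (nums.length : Int) 1) then true
      else aLoop1 nums rest
    else aLoop1 nums rest

def array123 (nums : List Int) : Bool :=
  aLoop1 nums (PySem.List.pyRange 0 (nums.length : Int) 1)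

-- ===== PORT B =====
-- one pass accumulating (seen1, seen2, seen3)
def altStep (s : Bool × Bool × Bool) (x : Int) : Bool × Bool × Bool :=
  if x = 1 then (true, s.2.1, s.2.2)
  else if x = 2 then (s.1, true, s.2.2)
  else if x = 3 then (s.1, s.2.1, true)
  else s

def array123_alt (nums : List Int) : Bool :=
  let s := nums.foldl altStep (false, false, false)
  s.1 && s.2.1 && s.2.2

-- ===== PRECONDITION & SPEC =====
def Spec_array123 (nums : List Int) (out : Bool) : Prop := out = array123_alt nums
instance (nums : List Int) (out : Bool) : Decidable (Spec_array123 nums out) := by unfold Spec_array123; infer_instance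

-- ===== CLAIM (what is proved, stated in full; the proofs are below) =====
def Claim_equal_array123 : Prop := ∀ (nums : List Int), Dom_array123 nums → Spec_array123 nums (array123 nums)

-- ===== LEMMAS AND PROOFS =====

-- each A-loop is "some index satisfies the test" (times the inner loop's constant value)
theorem aLoop3_eq (nums : List Int) (idxs : List Int) :
    aLoop3 nums idxs = idxs.any (fun e => decide (PySem.List.pyGet? nums e = some 3)) := by
  induction idxs with
  | nil => rfl
  | cons e rest ih =>
    simp only [aLoop3, List.any_cons, ih]
    split_ifs <;> simp_all

theorem aLoop2_eq (nums : List Int) (idxs : List Int) :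
    aLoop2 nums idxs =
      (idxs.any (fun e => decide (PySem.List.pyGet? nums e = some 2)) &&
        aLoop3 nums (PySem.List.pyRange 0 (nums.length : Int) 1)) := by
  induction idxs with
  | nil => rfl
  | cons e rest ih =>
    simp only [aLoop2, ih, List.any_cons]
    split_ifs <;> simp_all

theorem aLoop1_eq (nums : List Int) (idxs : List Int) :
    aLoop1 nums idxs =
      (idxs.any (fun e => decide (PySem.List.pyGet? nums e = some 1)) &&
        aLoop2 nums (PySem.List.pyRange 0 (nums.length : Int) 1)) := by
  induction idxs with
  | nil => rfl
  | cons e rest ih =>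
    simp only [aLoop1, ih, List.any_cons]
    split_ifs <;> simp_all

-- "some index in range(len nums) has nums[e] = t"  =  "t ∈ nums"
theorem anyIdx_eq (nums : List Int) (t : Int) :
    ((PySem.List.pyRange 0 (nums.length : Int) 1).any
        (fun e => decide (PySem.List.pyGet? nums e = some t))) = nums.any (· = t) := by
  rw [Bool.eq_iff_iff]
  simp only [List.any_eq_true, decide_eq_true_eq, PySem.List.mem_pyRange_one]
  constructor
  · rintro ⟨e, ⟨_, _⟩, he⟩
    exact ⟨t, PySem.List.mem_of_pyGet?_eq_some nums he, rfl⟩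
  · rintro ⟨x, hx, rfl⟩
    obtain ⟨k, hk, hget⟩ := List.mem_iff_getElem.mp hx
    refine ⟨(k : Int), ⟨by positivity, by exact_mod_cast hk⟩, ?_⟩
    simp [PySem.List.pyGet?_natCast, List.getElem?_eq_getElem hk, hget]

theorem array123_eq_mem (nums : List Int) :
    array123 nums = (nums.any (· = 1) && nums.any (· = 2) && nums.any (· = 3)) := by
  simp only [array123, aLoop1_eq, aLoop2_eq, aLoop3_eq, anyIdx_eq]
  cases nums.any (· = 1) <;> cases nums.any (· = 2) <;> cases nums.any (· = 3) <;> rfl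

-- the fold's invariant: each flag is "was already set, or the value occurs in the rest"
theorem alt_invariant (nums : List Int) (s : Bool × Bool × Bool) :
    nums.foldl altStep s =
      (s.1 || nums.any (· = 1), s.2.1 || nums.any (· = 2), s.2.2 || nums.any (· = 3)) := by
  induction nums generalizing s with
  | nil => simp
  | cons x rest ih =>
    simp only [List.foldl_cons, List.any_cons, ih]
    by_cases h1 : x = 1
    · simp [altStep, h1]
    · by_cases h2 : x = 2
      · simp [altStep, h2]
      · by_cases h3 : x = 3 <;> simp [altStep, h1, h2, h3]

theorem array123_alt_eq_mem (nums : List Int) :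
    array123_alt nums = (nums.any (· = 1) && nums.any (· = 2) && nums.any (· = 3)) := by
  simp [array123_alt, alt_invariant, Bool.and_assoc]

-- ===== VERDICT (by name: the statement is the Claim_ definition above) =====
theorem array123_spec : Claim_equal_array123 := by
  intro nums _
  unfold Spec_array123
  rw [array123_eq_mem, array123_alt_eq_mem]
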